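-- pv_equiv track=rewrite | github.com/jnesme/NCBIFetchMetadata | fetch_biosample_metadata.py | parse_csv_to_dict
-- ===== SOURCE A (Python) =====
-- KNOWN_ATTRIBUTES = {
--     'strain', 'collection_date', 'depth', 'env_broad_scale',
--     'env_local_scale', 'env_medium', 'geo_loc_name', 'isol_growth_condt',
--     'lat_lon', 'num_replicons', 'ref_biomaterial', 'type-material',
--     'isolation_source', 'collected_by', 'host', 'tissue', 'age',
--     'sex', 'dev_stage', 'biomaterial_provider', 'culture_collection',
--     'specimen_voucher', 'cultivar', 'ecotype', 'isolate', 'sub_strain',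
--     'cell_line', 'cell_type', 'serovar', 'serotype', 'pathovar',
--     'genotype', 'phenotype', 'note', 'temp', 'altitude', 'sample_type',
--     'BioSampleModel', 'organism'
-- }
--
-- def parse_csv_to_dict(csv_line):
--     """
--     Parse a CSV line with attribute,value pairs into a dictionary
--     Handles commas within values
--
--     Args:
--         csv_line: String with format "attr1,val1,attr2,val2,..."
--
--     Returns:
--         Dictionary of attributes
--     """
--     parts = csv_line.split(',')
--     sample_dict = {}
--     i = 0
--
--     while i < len(parts):
--         if parts[i] in KNOWN_ATTRIBUTES:
--             key = parts[i]
--             value_parts = []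
--             i += 1
--
--             # Collect value parts until we hit another known attribute
--             while i < len(parts) and parts[i] not in KNOWN_ATTRIBUTES:
--                 value_parts.append(parts[i])
--                 i += 1
--
--             # Join value parts with comma (to restore original value)
--             value = ','.join(value_parts)
--             sample_dict[key] = value
--         else:
--             i += 1
--
--     return sample_dict
-- ===== SOURCE B (Python) =====
-- KNOWN_ATTRIBUTES = {
--     'strain', 'collection_date', 'depth', 'env_broad_scale',
--     'env_local_scale', 'env_medium', 'geo_loc_name', 'isol_growth_condt',
--     'lat_lon', 'num_replicons', 'ref_biomaterial', 'type-material',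
--     'isolation_source', 'collected_by', 'host', 'tissue', 'age',
--     'sex', 'dev_stage', 'biomaterial_provider', 'culture_collection',
--     'specimen_voucher', 'cultivar', 'ecotype', 'isolate', 'sub_strain',
--     'cell_line', 'cell_type', 'serovar', 'serotype', 'pathovar',
--     'genotype', 'phenotype', 'note', 'temp', 'altitude', 'sample_type',
--     'BioSampleModel', 'organism'
-- }
--
--
-- def parse_csv_to_dict(csv_line):
--     # Index-table decomposition: first find every known-attribute position,
--     # then slice each value out between consecutive key positions.
--     parts = csv_line.split(',')
--     keys = [(i, p) for i, p in enumerate(parts) if p in KNOWN_ATTRIBUTES]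
--     bounds = [i for i, _ in keys[1:]] + [len(parts)]
--     sample_dict = {}
--     for (p, key), q in zip(keys, bounds):
--         sample_dict[key] = ','.join(parts[p + 1:q])
--     return sample_dict
-- ===== Notes on version B (the rewrite author's own statement) =====
-- stated objective: alternative
-- what changed: Replaced A's interleaved index-walking while-loops (inner loop collecting value tokens one by one) with a two-phase decomposition: one pass collects the positions of all known-attribute tokens into an index table, then each value is sliced out between consecutive key positions and joined.
import Mathlib
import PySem

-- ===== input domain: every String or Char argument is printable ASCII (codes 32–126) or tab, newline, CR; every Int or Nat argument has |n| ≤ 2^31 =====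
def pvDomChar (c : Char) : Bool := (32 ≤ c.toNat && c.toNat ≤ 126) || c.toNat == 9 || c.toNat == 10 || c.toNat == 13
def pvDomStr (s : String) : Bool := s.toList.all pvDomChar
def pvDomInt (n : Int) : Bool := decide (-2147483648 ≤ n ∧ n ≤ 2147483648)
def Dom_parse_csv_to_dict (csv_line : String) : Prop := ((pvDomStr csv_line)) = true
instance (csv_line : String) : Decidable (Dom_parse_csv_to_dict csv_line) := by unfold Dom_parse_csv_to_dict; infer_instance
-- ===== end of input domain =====

-- B re-implements A by first building the table of known-attribute positions and then
-- slicing each value out between consecutive key positions (alternative decomposition,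
-- same cost; return value only, no mutation involved).

-- ===== PORT A =====
-- KNOWN_ATTRIBUTES: a Python set used only for membership tests (exact as a set)
def knownAttributes : PySem.Set String := PySem.Set.ofList
  ["strain", "collection_date", "depth", "env_broad_scale", "env_local_scale", "env_medium",
   "geo_loc_name", "isol_growth_condt", "lat_lon", "num_replicons", "ref_biomaterial",
   "type-material", "isolation_source", "collected_by", "host", "tissue", "age", "sex",
   "dev_stage", "biomaterial_provider", "culture_collection", "specimen_voucher", "cultivar",
   "ecotype", "isolate", "sub_strain", "cell_line", "cell_type", "serovar", "serotype",
   "pathovar", "genotype", "phenotype", "note", "temp", "altitude", "sample_type",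
   "BioSampleModel", "organism"]

-- inner while loop of A: collect value parts until the next known attribute (or the end);
-- returns the collected parts and the index where it stopped
def collectValue (parts : List String) (i : Nat) (acc : List String) : List String × Nat :=
  if h : i < parts.length then
    if knownAttributes.contains parts[i] then (acc, i)
    else collectValue parts (i + 1) (acc ++ [parts[i]])
  else (acc, i)
termination_by parts.length - i

theorem collectValue_ge_aux (parts : List String) :
    ∀ (n i : Nat) (acc : List String), parts.length - i ≤ n → i ≤ (collectValue parts i acc).2 := by
  intro n
  induction n with
  | zero =>
    intro i acc h
    rw [collectValue]
    split
    · omega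
    · simp
  | succ n ih =>
    intro i acc h
    rw [collectValue]
    split
    · split
      · simp
      · exact Nat.le_trans (Nat.le_succ i) (ih (i + 1) _ (by omega))
    · simp

theorem collectValue_ge (parts : List String) (i : Nat) (acc : List String) :
    i ≤ (collectValue parts i acc).2 :=
  collectValue_ge_aux parts (parts.length - i) i acc (Nat.le_refl _)

-- outer while loop of A
def loopA (parts : List String) (d : PySem.Dict String String) (i : Nat) :
    PySem.Dict String String :=
  if h : i < parts.length then
    if knownAttributes.contains parts[i] then
      let r := collectValue parts (i + 1) []
      loopA parts (d.insert parts[i] (PySem.Str.join "," r.1)) r.2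
    else loopA parts d (i + 1)
  else d
termination_by parts.length - i
decreasing_by
  · have := collectValue_ge parts (i + 1) []
    omega
  · omega

def parse_csv_to_dict (csv_line : String) : List (String × String) :=
  (loopA ((PySem.Str.split? csv_line ",").getD []) PySem.Dict.empty 0).items

-- ===== PORT B =====
def parse_csv_to_dict_alt (csv_line : String) : List (String × String) :=
  let parts := (PySem.Str.split? csv_line ",").getD []
  let keys := (PySem.List.enumerate parts 0).filterMap
    (fun ip => if knownAttributes.contains ip.2 then some ip else none)
  let bounds := (keys.drop 1).map (·.1) ++ [(parts.length : Int)]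
  ((keys.zip bounds).foldl
    (fun d pkq =>
      d.insert pkq.1.2
        (PySem.Str.join "," (PySem.List.slice parts (some (pkq.1.1 + 1)) (some pkq.2))))
    PySem.Dict.empty).items

-- ===== PRECONDITION & SPEC =====
def Spec_parse_csv_to_dict (csv_line : String) (out : List (String × String)) : Prop := out = parse_csv_to_dict_alt csv_line
instance (csv_line : String) (out : List (String × String)) : Decidable (Spec_parse_csv_to_dict csv_line out) := by unfold Spec_parse_csv_to_dict; infer_instance

-- ===== CLAIM (what is proved, stated in full; the proofs are below) =====
def Claim_equal_parse_csv_to_dict : Prop := ∀ (csv_line : String), Dom_parse_csv_to_dict csv_line → Spec_parse_csv_to_dict csv_line (parse_csv_to_dict csv_line)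

-- ===== LEMMAS AND PROOFS =====

-- the table of known-attribute positions at indices ≥ i, with their tokens
def keysFrom (parts : List String) (i : Nat) : List (Nat × String) :=
  if h : i < parts.length then
    if knownAttributes.contains parts[i] then (i, parts[i]) :: keysFrom parts (i + 1)
    else keysFrom parts (i + 1)
  else []
termination_by parts.length - i

-- index of the first key in the table, or len(parts)
def headIdx (parts : List String) (l : List (Nat × String)) : Nat :=
  match l with
  | [] => parts.length
  | (p, _) :: _ => p

def stopAt (parts : List String) (i : Nat) : Nat := headIdx parts (keysFrom parts i)

-- Nat-indexed version of B's fold step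
def stepN (parts : List String) (d : PySem.Dict String String)
    (x : (Nat × String) × Nat) : PySem.Dict String String :=
  d.insert x.1.2 (PySem.Str.join "," (parts.extract (x.1.1 + 1) x.2))

def boundsN (parts : List String) (l : List (Nat × String)) : List Nat :=
  (l.drop 1).map (·.1) ++ [parts.length]

theorem keysFrom_ge (parts : List String) :
    ∀ (n i : Nat), parts.length - i ≤ n → ∀ pk ∈ keysFrom parts i, i ≤ pk.1 := by
  intro n
  induction n with
  | zero =>
    intro i h pk hpk
    rw [keysFrom] at hpk
    rw [dif_neg (by omega)] at hpk
    simp at hpk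
  | succ n ih =>
    intro i h pk hpk
    rw [keysFrom] at hpk
    split at hpk
    · split at hpk
      · rcases List.mem_cons.1 hpk with h1 | h1
        · subst h1; simp
        · exact Nat.le_trans (Nat.le_succ i) (ih (i + 1) (by omega) pk h1)
      · exact Nat.le_trans (Nat.le_succ i) (ih (i + 1) (by omega) pk hpk)
    · simp at hpk

theorem keysFrom_lt (parts : List String) :
    ∀ (n i : Nat), parts.length - i ≤ n → ∀ pk ∈ keysFrom parts i, pk.1 < parts.length := by
  intro n
  induction n with
  | zero =>
    intro i h pk hpk
    rw [keysFrom, dif_neg (by omega)] at hpk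
    simp at hpk
  | succ n ih =>
    intro i h pk hpk
    rw [keysFrom] at hpk
    split at hpk
    · rename_i hi
      split at hpk
      · rcases List.mem_cons.1 hpk with h1 | h1
        · subst h1; simpa using hi
        · exact ih (i + 1) (by omega) pk h1
      · exact ih (i + 1) (by omega) pk hpk
    · simp at hpk

theorem stopAt_ge (parts : List String) (i : Nat) (hle : i ≤ parts.length) :
    i ≤ stopAt parts i := by
  rw [stopAt]
  cases hK : keysFrom parts i with
  | nil => simpa [headIdx] using hle
  | cons pk rest =>
    have := keysFrom_ge parts (parts.length - i) i (Nat.le_refl _) pk (hK ▸ List.mem_cons_self ..)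
    simpa [headIdx] using this

theorem stopAt_le (parts : List String) (i : Nat) : stopAt parts i ≤ parts.length := by
  rw [stopAt]
  cases hK : keysFrom parts i with
  | nil => simp [headIdx]
  | cons pk rest =>
    have := keysFrom_lt parts (parts.length - i) i (Nat.le_refl _) pk (hK ▸ List.mem_cons_self ..)
    simpa [headIdx] using Nat.le_of_lt this

-- jumping to the first key position does not change the key table
theorem keysFrom_stopAt (parts : List String) :
    ∀ (n i : Nat), parts.length - i ≤ n → keysFrom parts (stopAt parts i) = keysFrom parts i := by
  intro n
  induction n with
  | zero =>
    intro i h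
    have hK : keysFrom parts i = [] := by rw [keysFrom, dif_neg (by omega)]
    rw [stopAt, hK]
    show keysFrom parts parts.length = []
    rw [keysFrom, dif_neg (by omega)]
  | succ n ih =>
    intro i h
    by_cases hi : i < parts.length
    · by_cases hk : knownAttributes.contains parts[i]
      · have hK : keysFrom parts i = (i, parts[i]) :: keysFrom parts (i + 1) := by
          rw [keysFrom, dif_pos hi, if_pos hk]
        rw [stopAt, hK]
        show keysFrom parts i = _
        rw [hK]
      · have hK : keysFrom parts i = keysFrom parts (i + 1) := by
          rw [keysFrom, dif_pos hi, if_neg hk]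
        rw [stopAt, hK]
        have := ih (i + 1) (by omega)
        rw [stopAt] at this
        rw [this]
    · have hK : keysFrom parts i = [] := by rw [keysFrom, dif_neg hi]
      rw [stopAt, hK]
      show keysFrom parts parts.length = []
      rw [keysFrom, dif_neg (by omega)]

-- the inner while loop collects exactly the slice up to the next key position
theorem collectValue_eq (parts : List String) :
    ∀ (n i : Nat) (acc : List String), parts.length - i ≤ n → i ≤ parts.length →
      collectValue parts i acc =
        (acc ++ parts.extract i (stopAt parts i), stopAt parts i) := by
  intro n
  induction n with
  | zero =>
    intro i acc h hle
    have hi : i = parts.length := by omega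
    have hK : keysFrom parts i = [] := by rw [keysFrom, dif_neg (by omega)]
    rw [collectValue, dif_neg (by omega), stopAt, hK]
    simp [headIdx, hi]
  | succ n ih =>
    intro i acc h hle
    by_cases hi : i < parts.length
    · by_cases hk : knownAttributes.contains parts[i]
      · have hK : keysFrom parts i = (i, parts[i]) :: keysFrom parts (i + 1) := by
          rw [keysFrom, dif_pos hi, if_pos hk]
        rw [collectValue, dif_pos hi, if_pos hk, stopAt, hK]
        simp [headIdx]
      · have hK : keysFrom parts i = keysFrom parts (i + 1) := by
          rw [keysFrom, dif_pos hi, if_neg hk]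
        have hstop : stopAt parts i = stopAt parts (i + 1) := by rw [stopAt, stopAt, hK]
        rw [collectValue, dif_pos hi, if_neg hk, ih (i + 1) _ (by omega) (by omega), hstop]
        have hge : i + 1 ≤ stopAt parts (i + 1) := stopAt_ge parts (i + 1) (by omega)
        have hext : parts.extract i (stopAt parts (i + 1)) =
            parts[i] :: parts.extract (i + 1) (stopAt parts (i + 1)) := by
          rw [List.extract_eq_take_drop, List.extract_eq_take_drop,
            List.drop_eq_getElem_cons hi]
          have : stopAt parts (i + 1) - i = (stopAt parts (i + 1) - (i + 1)) + 1 := by omega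
          rw [this, List.take_succ_cons]
        rw [hext]
        simp
    · have hi' : i = parts.length := by omega
      have hK : keysFrom parts i = [] := by rw [keysFrom, dif_neg hi]
      rw [collectValue, dif_neg hi, stopAt, hK]
      simp [headIdx, hi']

theorem foldl_fun_eq {α β : Type} (f g : α → β → α) (h : ∀ a b, f a b = g a b) :
    ∀ (l : List β) (init : α), l.foldl f init = l.foldl g init := by
  intro l
  induction l with
  | nil => intro init; rfl
  | cons x xs ih => intro init; simp only [List.foldl_cons, h, ih]

theorem zip_bounds_cons (parts : List String) (a : Nat × String) (rest : List (Nat × String)) :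
    (a :: rest).zip (boundsN parts (a :: rest)) =
      (a, headIdx parts rest) :: rest.zip (boundsN parts rest) := by
  cases rest with
  | nil => simp [boundsN, headIdx]
  | cons b r => simp [boundsN, headIdx]

-- the outer while loop is the fold of B's step over the key table
theorem loopA_eq (parts : List String) :
    ∀ (n i : Nat) (d : PySem.Dict String String), parts.length - i ≤ n → i ≤ parts.length →
      loopA parts d i =
        ((keysFrom parts i).zip (boundsN parts (keysFrom parts i))).foldl (stepN parts) d := by
  intro n
  induction n with
  | zero =>
    intro i d h hle
    have hK : keysFrom parts i = [] := by rw [keysFrom, dif_neg (by omega)]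
    rw [loopA, dif_neg (by omega), hK]
    simp
  | succ n ih =>
    intro i d h hle
    by_cases hi : i < parts.length
    · by_cases hk : knownAttributes.contains parts[i]
      · have hK : keysFrom parts i = (i, parts[i]) :: keysFrom parts (i + 1) := by
          rw [keysFrom, dif_pos hi, if_pos hk]
        rw [loopA, dif_pos hi, if_pos hk]
        rw [collectValue_eq parts (parts.length - (i + 1)) (i + 1) [] (Nat.le_refl _) (by omega)]
        have hstople : stopAt parts (i + 1) ≤ parts.length := stopAt_le parts (i + 1)
        have hstopge : i + 1 ≤ stopAt parts (i + 1) := stopAt_ge parts (i + 1) (by omega)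
        rw [ih (stopAt parts (i + 1)) _ (by omega) hstople]
        rw [keysFrom_stopAt parts (parts.length - (i + 1)) (i + 1) (Nat.le_refl _)]
        rw [hK, zip_bounds_cons]
        simp only [List.foldl_cons]
        rfl
      · have hK : keysFrom parts i = keysFrom parts (i + 1) := by
          rw [keysFrom, dif_pos hi, if_neg hk]
        rw [loopA, dif_pos hi, if_neg hk, ih (i + 1) d (by omega) (by omega), hK]
    · have hK : keysFrom parts i = [] := by rw [keysFrom, dif_neg hi]
      rw [loopA, dif_neg hi, hK]
      simp

-- B's position-collecting comprehension computes the key table (with Int indices)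
theorem keys_bridge (parts : List String) :
    ∀ (n i : Nat), parts.length - i ≤ n →
      (PySem.List.enumerate (parts.drop i) (i : Int)).filterMap
          (fun ip => if knownAttributes.contains ip.2 then some ip else none) =
        (keysFrom parts i).map (fun pk => ((pk.1 : Int), pk.2)) := by
  intro n
  induction n with
  | zero =>
    intro i h
    have hK : keysFrom parts i = [] := by rw [keysFrom, dif_neg (by omega)]
    rw [List.drop_of_length_le (by omega), hK]
    simp [PySem.List.enumerate]
  | succ n ih =>
    intro i h
    by_cases hi : i < parts.length
    · rw [List.drop_eq_getElem_cons hi, PySem.List.enumerate_cons, List.filterMap_cons]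
      have hcast : (i : Int) + 1 = ((i + 1 : Nat) : Int) := by push_cast; ring
      rw [hcast, ih (i + 1) (by omega)]
      by_cases hk : knownAttributes.contains parts[i]
      · have hK : keysFrom parts i = (i, parts[i]) :: keysFrom parts (i + 1) := by
          rw [keysFrom, dif_pos hi, if_pos hk]
        rw [hK]
        dsimp only
        simp only [hk]
        simp
      · have hK : keysFrom parts i = keysFrom parts (i + 1) := by
          rw [keysFrom, dif_pos hi, if_neg hk]
        rw [hK]
        dsimp only
        simp only [Bool.not_eq_true] at hk
        simp only [hk]
        simp
    · have hK : keysFrom parts i = [] := by rw [keysFrom, dif_neg hi]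
      rw [List.drop_of_length_le (by omega), hK]
      simp [PySem.List.enumerate]

-- ===== VERDICT (by name: the statement is the Claim_ definition above) =====
set_option maxHeartbeats 1000000 in
theorem parse_csv_to_dict_spec : Claim_equal_parse_csv_to_dict := by
  intro csv_line _
  unfold Spec_parse_csv_to_dict parse_csv_to_dict parse_csv_to_dict_alt
  dsimp only
  set parts := (PySem.Str.split? csv_line ",").getD [] with hparts
  rw [loopA_eq parts parts.length 0 _ (by omega) (by omega)]
  have hkeys : (PySem.List.enumerate parts 0).filterMap
      (fun ip => if knownAttributes.contains ip.2 then some ip else none) =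
      (keysFrom parts 0).map (fun pk => ((pk.1 : Int), pk.2)) := by
    have := keys_bridge parts parts.length 0 (by omega)
    simpa using this
  rw [hkeys]
  set K := keysFrom parts 0 with hKdef
  -- B's Int-indexed bounds are the casts of the Nat bounds
  have hbounds : (((K.map (fun pk => ((pk.1 : Int), pk.2))).drop 1).map (·.1) ++
      [(parts.length : Int)]) = (boundsN parts K).map (fun q : Nat => (q : Int)) := by
    simp only [boundsN, List.map_append, List.map_map, List.map_drop]
    rfl
  rw [hbounds, List.zip_map, List.foldl_map]
  refine congrArg PySem.Dict.items (foldl_fun_eq _ _ (fun d x => ?_) _ _)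
  rcases x with ⟨⟨p, k⟩, q⟩
  simp only [stepN, Prod.map]
  have hcast : ((p : Int) + 1) = ((p + 1 : Nat) : Int) := by push_cast; ring
  rw [hcast, PySem.List.slice_natCast, List.extract_eq_take_drop]
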